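-- pv_equiv track=rewrite | github.com/Wulfic/Cicada3301 | tools/archive/transpose_first.py | skip_reorder
-- ===== SOURCE A (Python) =====
-- def skip_reorder(indices, skip):
--     """Reorder by reading every nth character."""
--     n = len(indices)
--     result = []
--     visited = [False] * n
--     pos = 0
--     while len(result) < n:
--         if not visited[pos]:
--             result.append(indices[pos])
--             visited[pos] = True
--         pos = (pos + skip) % n
--         # Safety: if we're stuck, find next unvisited
--         if visited[pos]:
--             for i in range(n):
--                 if not visited[i]:
--                     pos = i
--                     break
--             else:
--                 break
--     return result
-- ===== SOURCE B (Python) =====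
-- def _gcd(a, b):
--     while b:
--         a, b = b, a % b
--     return a
--
-- def skip_reorder(indices, skip):
--     """Reorder by reading every nth character."""
--     n = len(indices)
--     if n == 0:
--         return []
--     k = skip % n
--     g = _gcd(k, n)
--     m = n // g
--     return [indices[(r + j * k) % n] for r in range(g) for j in range(m)]
-- ===== Notes on version B (the rewrite author's own statement) =====
-- stated objective: faster
-- what changed: B drops A's visited-array simulation and restart rescans entirely: the skip-walk provably decomposes into g = gcd(skip mod n, n) residue classes read in full starting at 0,1,...,g-1, so B emits indices[(r + j*k) % n] by a closed-form double loop.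
import Mathlib
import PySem

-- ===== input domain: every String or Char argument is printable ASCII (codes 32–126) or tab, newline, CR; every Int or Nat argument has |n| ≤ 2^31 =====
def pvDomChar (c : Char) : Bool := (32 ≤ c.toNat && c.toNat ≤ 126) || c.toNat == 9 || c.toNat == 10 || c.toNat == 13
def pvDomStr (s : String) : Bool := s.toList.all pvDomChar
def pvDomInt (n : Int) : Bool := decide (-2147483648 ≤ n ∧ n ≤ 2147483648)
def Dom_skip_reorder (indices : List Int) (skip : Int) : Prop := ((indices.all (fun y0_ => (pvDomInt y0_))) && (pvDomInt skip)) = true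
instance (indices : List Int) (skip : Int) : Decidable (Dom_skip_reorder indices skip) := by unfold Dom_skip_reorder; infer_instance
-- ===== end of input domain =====

-- B replaces A's stateful visited-array walk by the closed form: the walk splits into
-- gcd(skip mod n, n) residue classes, each read in full before restarting at the next class.

-- ===== PORT A =====
-- pos = (pos + skip) % n, Python modulo (n > 0 in every reachable call)
def pvStep (skip : Int) (n pos : Nat) : Nat :=
  (PySem.Int.mod ((pos : Int) + skip) (n : Int)).toNat

-- A's while loop; each Python iteration appends one element (pos is unvisited at
-- the top of every real iteration), so fuel = len(indices) is exact.
def skip_reorder_loopA (indices : List Int) (skip : Int) :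
    Nat → List Bool → List Int → Nat → List Int
  | 0, _, result, _ => result
  | fuel + 1, visited, result, pos =>
    if result.length < indices.length then
      let result' := if visited.getD pos false = false then result ++ [indices.getD pos 0] else result
      let visited' := if visited.getD pos false = false then visited.set pos true else visited
      let pos' := pvStep skip indices.length pos
      if visited'.getD pos' false = true then
        match visited'.findIdx? (fun b => !b) with
        | some i => skip_reorder_loopA indices skip fuel visited' result' i
        | none => result'
      else
        skip_reorder_loopA indices skip fuel visited' result' pos'
    else result

def skip_reorder (indices : List Int) (skip : Int) : List Int :=
  skip_reorder_loopA indices skip indices.length (List.replicate indices.length false) [] 0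

-- ===== PORT B =====
-- _gcd(a,b): while b: a, b = b, a % b
def pyGcd (a b : Nat) : Nat :=
  if b = 0 then a else pyGcd b (a % b)
termination_by b
decreasing_by exact Nat.mod_lt _ (by omega)

def skip_reorder_alt (indices : List Int) (skip : Int) : List Int :=
  let n := indices.length
  if n = 0 then []
  else
    let k := (PySem.Int.mod skip (n : Int)).toNat
    let g := pyGcd k n
    let m := n / g
    (List.range g).flatMap (fun r => (List.range m).map (fun j => indices.getD ((r + j * k) % n) 0))

-- ===== PRECONDITION & SPEC =====
def Spec_skip_reorder (indices : List Int) (skip : Int) (out : List Int) : Prop := out = skip_reorder_alt indices skip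
instance (indices : List Int) (skip : Int) (out : List Int) : Decidable (Spec_skip_reorder indices skip out) := by unfold Spec_skip_reorder; infer_instance

-- ===== CLAIM =====
def Claim_equal_skip_reorder : Prop := ∀ (indices : List Int) (skip : Int), Dom_skip_reorder indices skip → Spec_skip_reorder indices skip (skip_reorder indices skip)

-- ===== LEMMAS AND PROOFS =====

lemma pyGcd_eq (a b : Nat) : pyGcd a b = Nat.gcd a b := by
  rw [pyGcd]
  split
  · simp [*]
  · rw [pyGcd_eq b (a % b), Nat.gcd_comm b (a % b), ← Nat.gcd_rec, Nat.gcd_comm]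
termination_by b
decreasing_by exact Nat.mod_lt _ (by omega)

lemma pvStep_eq (skip : Int) (n pos : Nat) (hn : 0 < n) :
    pvStep skip n pos = (pos + (PySem.Int.mod skip (n : Int)).toNat) % n := by
  have hn' : (0 : Int) < (n : Int) := by exact_mod_cast hn
  unfold pvStep
  simp only [PySem.Int.mod_eq_emod_of_pos hn']
  have ha : (0 : Int) ≤ skip % (n : Int) := Int.emod_nonneg _ (by omega)
  have h2 : ((pos : Int) + skip) % n = (((pos + (skip % (n : Int)).toNat) % n : Nat) : Int) := by
    push_cast [Int.toNat_of_nonneg ha]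
    conv_rhs => rw [Int.add_emod, Int.emod_emod_of_dvd skip (dvd_refl _), ← Int.add_emod]
  rw [h2, Int.toNat_natCast]

lemma getD_set_eq (v : List Bool) (p i : Nat) (hp : p < v.length) :
    (v.set p true).getD i false = if i = p then true else v.getD i false := by
  by_cases h : i = p
  · subst h; simp [List.getD, hp]
  · simp [List.getD, List.getElem?_set_ne (Ne.symm h), h]

lemma findIdx?_eq_of_prefix (v : List Bool) (k : Nat)
    (hpre : ∀ j, j < k → v.getD j false = true)
    (hk : k ≤ v.length)
    (hstop : k < v.length → v.getD k false = false) :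
    v.findIdx? (fun b => !b) = if k < v.length then some k else none := by
  induction v generalizing k with
  | nil => simp
  | cons x xs ih =>
    cases k with
    | zero =>
      have : x = false := by simpa [List.getD] using hstop (by simp)
      subst this
      simp [List.findIdx?_cons]
    | succ k =>
      have hx : x = true := by simpa [List.getD] using hpre 0 (by omega)
      subst hx
      have := ih k (fun j hj => by simpa [List.getD] using hpre (j+1) (by omega))
        (by simpa using hk) (fun h => by simpa [List.getD] using hstop (by simpa using h))
      simp only [List.findIdx?_cons, Bool.not_true]
      rw [this]
      by_cases h : k < xs.length <;> simp [h]

-- injectivity of t ↦ (r + t*k) % n on t < n / gcd k n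
lemma chain_inj_le (n k r t1 t2 : Nat) (hn0 : 0 < n) (h12 : t1 ≤ t2)
    (h2 : t2 < n / Nat.gcd k n)
    (he : (r + t1 * k) % n = (r + t2 * k) % n) : t1 = t2 := by
  set g := Nat.gcd k n with hgdef
  have hg0 : 0 < g := Nat.gcd_pos_of_pos_right k hn0
  have hgn : g ∣ n := Nat.gcd_dvd_right k n
  have hgk : g ∣ k := Nat.gcd_dvd_left k n
  have hmul : t1 * k ≤ t2 * k := Nat.mul_le_mul_right k h12
  have hdvd : n ∣ (t2 - t1) * k := by
    have h : (r + t1 * k) ≡ (r + t2 * k) [MOD n] := he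
    have h' : t1 * k ≡ t2 * k [MOD n] := Nat.ModEq.add_left_cancel' r h
    have := (Nat.modEq_iff_dvd' hmul).mp h'
    rwa [← Nat.sub_mul] at this
  have hco : Nat.Coprime (n / g) (k / g) :=
    (Nat.coprime_div_gcd_div_gcd (m := k) (n := n) hg0).symm
  have hkd : g * (k / g) = k := Nat.mul_div_cancel' hgk
  have hnd : g * (n / g) = n := Nat.mul_div_cancel' hgn
  have hdvd2 : (n / g) ∣ (t2 - t1) * (k / g) := by
    have : g * (n / g) ∣ (t2 - t1) * (g * (k / g)) := by rw [hkd, hnd]; exact hdvd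
    have h2' : g * (n / g) ∣ g * ((t2 - t1) * (k / g)) := by
      rwa [show (t2 - t1) * (g * (k / g)) = g * ((t2 - t1) * (k / g)) by ring] at this
    exact (Nat.mul_dvd_mul_iff_left hg0).mp h2'
  have hdvd3 : (n / g) ∣ (t2 - t1) := hco.dvd_of_dvd_mul_right hdvd2
  have : t2 - t1 = 0 := Nat.eq_zero_of_dvd_of_lt hdvd3 (by omega)
  omega

lemma chain_inj (n k r t1 t2 : Nat) (hn0 : 0 < n) (h1 : t1 < n / Nat.gcd k n)
    (h2 : t2 < n / Nat.gcd k n)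
    (he : (r + t1 * k) % n = (r + t2 * k) % n) : t1 = t2 := by
  rcases le_total t1 t2 with h | h
  · exact chain_inj_le n k r t1 t2 hn0 h h2 he
  · exact (chain_inj_le n k r t2 t1 hn0 h h1 he.symm).symm

-- residue of every chain element
lemma chain_res (n k g r j : Nat) (hgn : g ∣ n) (hgk : g ∣ k) (hr : r < g) :
    ((r + j * k) % n) % g = r := by
  obtain ⟨k0, rfl⟩ := hgk
  rw [Nat.mod_mod_of_dvd _ hgn]
  rw [show r + j * (g * k0) = r + (j * k0) * g by ring]
  rw [Nat.add_mul_mod_self_right, Nat.mod_eq_of_lt hr]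

-- the chain returns to its start after n/g steps
lemma chain_ret (n k g r : Nat) (hg0 : 0 < g) (hgk : g ∣ k) (hgn : g ∣ n)
    (hrn : r < n) : (r + (n / g) * k) % n = r := by
  have h1 : (n / g) * k = n * (k / g) := by
    obtain ⟨k0, hk⟩ := hgk
    subst hk
    rw [Nat.mul_div_cancel_left _ hg0,
      show n / g * (g * k0) = n / g * g * k0 by ring, Nat.div_mul_cancel hgn]
  rw [h1, Nat.add_mul_mod_self_left, Nat.mod_eq_of_lt hrn]

-- the chain covers its whole residue class
lemma chain_surj (n k r i : Nat) (hn0 : 0 < n) (hi : i < n)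
    (hir : i % Nat.gcd k n = r) :
    ∃ t, t < n / Nat.gcd k n ∧ (r + t * k) % n = i := by
  have hg0 : 0 < Nat.gcd k n := Nat.gcd_pos_of_pos_right k hn0
  have hgn : Nat.gcd k n ∣ n := Nat.gcd_dvd_right k n
  have hgk : Nat.gcd k n ∣ k := Nat.gcd_dvd_left k n
  have hr : r < Nat.gcd k n := hir ▸ Nat.mod_lt i hg0
  have hmaps : ∀ t ∈ Finset.range (n / Nat.gcd k n),
      (fun t => (r + t * k) % n) t ∈ (Finset.range n).filter (fun x => x % Nat.gcd k n = r) := by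
    intro t _
    simp only [Finset.mem_filter, Finset.mem_range]
    exact ⟨Nat.mod_lt _ hn0, chain_res n k (Nat.gcd k n) r t hgn hgk hr⟩
  have hinj : ∀ a₁ ∈ Finset.range (n / Nat.gcd k n), ∀ a₂ ∈ Finset.range (n / Nat.gcd k n),
      (fun t => (r + t * k) % n) a₁ = (fun t => (r + t * k) % n) a₂ → a₁ = a₂ := by
    intro a₁ h₁ a₂ h₂ he
    exact chain_inj n k r a₁ a₂ hn0 (Finset.mem_range.mp h₁) (Finset.mem_range.mp h₂) he
  have hcard : ((Finset.range n).filter (fun x => x % Nat.gcd k n = r)).card ≤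
      (Finset.range (n / Nat.gcd k n)).card := by
    apply Finset.card_le_card_of_injOn (fun x => x / Nat.gcd k n)
    · intro x hx
      have hx' := Finset.mem_filter.mp hx
      exact Finset.mem_range.mpr (Nat.div_lt_div_of_lt_of_dvd hgn (Finset.mem_range.mp hx'.1))
    · intro x1 hx1 x2 hx2 hdiv
      simp only [Finset.coe_filter, Finset.mem_range, Set.mem_setOf_eq] at hx1 hx2
      have hdiv' : x1 / Nat.gcd k n = x2 / Nat.gcd k n := hdiv
      have e1 := Nat.div_add_mod x1 (Nat.gcd k n)
      have e2 := Nat.div_add_mod x2 (Nat.gcd k n)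
      rw [hdiv'] at e1
      have hm1 : x1 % Nat.gcd k n = r := hx1.2
      have hm2 : x2 % Nat.gcd k n = r := hx2.2
      omega
  obtain ⟨t, ht, hft⟩ := Finset.surj_on_of_inj_on_of_card_le
    (fun t _ => (r + t * k) % n) (fun t h => hmaps t h)
    (fun a₁ a₂ h₁ h₂ he => hinj a₁ h₁ a₂ h₂ he) hcard i
    (by simp only [Finset.mem_filter, Finset.mem_range]; exact ⟨hi, hir⟩)
  exact ⟨t, Finset.mem_range.mp ht, hft.symm⟩

-- chain suffix + remaining full chains: the target value of A's loop from state (r, j)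
def pvChainFrom (indices : List Int) (k g r j : Nat) : List Int :=
  (List.range' j (indices.length / g - j)).map
    (fun t => indices.getD ((r + t * k) % indices.length) 0)

def pvTail (indices : List Int) (k g r j : Nat) : List Int :=
  pvChainFrom indices k g r j
    ++ (List.range' (r + 1) (g - (r + 1))).flatMap (fun r' => pvChainFrom indices k g r' 0)

lemma loopA_chains (indices : List Int) (skip : Int)
    (n k g m : Nat) (hn : n = indices.length) (hn0 : 0 < n)
    (hk : k = (PySem.Int.mod skip (n : Int)).toNat)
    (hg : g = Nat.gcd k n) (hm : m = n / g) :
    ∀ (fuel r j : Nat) (v : List Bool) (result : List Int),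
    r < g → j < m →
    fuel = n - (r * m + j) →
    v.length = n →
    (∀ i, i < n → (v.getD i false = true ↔
      (i % g < r ∨ (i % g = r ∧ ∃ t, t < j ∧ (r + t * k) % n = i)))) →
    result.length = r * m + j →
    skip_reorder_loopA indices skip fuel v result ((r + j * k) % n) =
      result ++ pvTail indices k g r j := by
  have hg0 : 0 < g := hg ▸ Nat.gcd_pos_of_pos_right k hn0
  have hgn : g ∣ n := hg ▸ Nat.gcd_dvd_right k n
  have hgk : g ∣ k := hg ▸ Nat.gcd_dvd_left k n
  have hgm : g * m = n := hm ▸ Nat.mul_div_cancel' hgn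
  have hgle : g ≤ n := Nat.le_of_dvd hn0 hgn
  intro fuel
  induction fuel with
  | zero =>
    intro r j v result hr hj hfuel _ _ _
    exfalso
    have : r * m + j < n := by nlinarith
    omega
  | succ fuel ih =>
    intro r j v result hr hj hfuel hvlen hvchar hrlen
    set pos := (r + j * k) % n with hposdef
    have hposn : pos < n := Nat.mod_lt _ hn0
    have hposg : pos % g = r := chain_res n k g r j hgn hgk hr
    have hbound : r * m + j < n := by nlinarith
    -- pos is unvisited
    have hunv : v.getD pos false = false := by
      cases hb : v.getD pos false with
      | false => rfl
      | true =>
        rcases (hvchar pos hposn).mp hb with h1 | ⟨_, t, ht, hteq⟩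
        · omega
        · have := chain_inj n k r t j hn0 (by rw [← hg, ← hm]; omega) (by rw [← hg, ← hm]; omega) hteq
          omega
    rw [skip_reorder_loopA]
    rw [if_pos (by rw [← hn, hrlen]; exact hbound)]
    simp only [hunv, reduceIte]
    have hstep : pvStep skip indices.length pos = (r + (j + 1) * k) % n := by
      rw [← hn, pvStep_eq skip n pos hn0, ← hk, hposdef, Nat.mod_add_mod,
        show r + j * k + k = r + (j + 1) * k by ring]
    -- characterization of the updated visited list
    have hvlen' : (v.set pos true).length = n := by simpa using hvlen
    have hvchar' : ∀ i, i < n → ((v.set pos true).getD i false = true ↔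
        (i % g < r ∨ (i % g = r ∧ ∃ t, t < j + 1 ∧ (r + t * k) % n = i))) := by
      intro i hi
      rw [getD_set_eq v pos i (by omega)]
      by_cases hip : i = pos
      · subst hip
        constructor
        · intro _
          exact Or.inr ⟨hposg, j, by omega, rfl⟩
        · intro _
          simp
      · rw [if_neg hip, hvchar i hi]
        constructor
        · rintro (h1 | ⟨h2, t, ht, hteq⟩)
          · exact Or.inl h1
          · exact Or.inr ⟨h2, t, by omega, hteq⟩
        · rintro (h1 | ⟨h2, t, ht, hteq⟩)
          · exact Or.inl h1
          · refine Or.inr ⟨h2, t, ?_, hteq⟩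
            rcases Nat.lt_succ_iff_lt_or_eq.mp ht with h | h
            · exact h
            · exfalso
              apply hip
              rw [← hteq, h]
    have hrlen' : (result ++ [indices.getD pos 0]).length = r * m + j + 1 := by
      simp [hrlen]
    -- peel one element off the chain suffix
    have htail : pvTail indices k g r j =
        indices.getD pos 0 :: pvTail indices k g r (j + 1) := by
      unfold pvTail pvChainFrom
      rw [← hn, ← hm]
      have h1 : m - j = (m - (j + 1)) + 1 := by omega
      rw [h1, List.range'_succ, List.map_cons]
      simp [hposdef]
    by_cases hj1 : j + 1 < m
    · -- next chain element is unvisited: continue the walk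
      have hnx : (v.set pos true).getD ((r + (j + 1) * k) % n) false = false := by
        cases hb : (v.set pos true).getD ((r + (j + 1) * k) % n) false with
        | false => rfl
        | true =>
          exfalso
          have hlt : (r + (j + 1) * k) % n < n := Nat.mod_lt _ hn0
          rcases (hvchar' _ hlt).mp hb with h1 | ⟨_, t, ht, hteq⟩
          · rw [chain_res n k g r (j + 1) hgn hgk hr] at h1; omega
          · have := chain_inj n k r t (j + 1) hn0 (by rw [← hg, ← hm]; omega) (by rw [← hg, ← hm]; omega) hteq
            omega
      rw [hstep]
      simp only [hnx, Bool.false_eq_true, reduceIte]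
      rw [ih r (j + 1) (v.set pos true) (result ++ [indices.getD pos 0]) hr hj1
        (by omega) hvlen' hvchar' hrlen']
      rw [htail]
      simp
    · -- chain finished: the walk returns to r, rescue scan picks the next class
      have hjm : j + 1 = m := by omega
      have hret : (r + (j + 1) * k) % n = r := by
        rw [hjm, hm]
        exact chain_ret n k g r hg0 hgk hgn (by omega)
      -- r itself is visited (it is the chain's start)
      have hrvis : (v.set pos true).getD r false = true := by
        apply (hvchar' r (by omega)).mpr
        exact Or.inr ⟨Nat.mod_eq_of_lt hr, 0, by omega, by simp [Nat.mod_eq_of_lt (show r < n by omega)]⟩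
      -- after the full chain, class r is exactly "i % g ≤ r"
      have hvchar'' : ∀ i, i < n → ((v.set pos true).getD i false = true ↔ i % g ≤ r) := by
        intro i hi
        rw [hvchar' i hi]
        constructor
        · rintro (h1 | ⟨h2, _⟩)
          · omega
          · omega
        · intro h
          rcases Nat.lt_or_ge (i % g) r with h1 | h1
          · exact Or.inl h1
          · have hir : i % g = r := by omega
            obtain ⟨t, ht, hteq⟩ := chain_surj n k r i hn0 hi (by rw [← hg]; exact hir)
            have htm : t < m := by rw [hm, hg]; exact ht
            exact Or.inr ⟨hir, t, by omega, hteq⟩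
      rw [hstep]
      simp only [hret, hrvis, reduceIte]
      by_cases hrg : r + 1 < g
      · -- findIdx? finds r+1, the smallest index of the next class
        have hfind : (v.set pos true).findIdx? (fun b => !b) = some (r + 1) := by
          rw [findIdx?_eq_of_prefix (v.set pos true) (r + 1)
            (fun i hi => (hvchar'' i (by omega)).mpr
              (by rw [Nat.mod_eq_of_lt (by omega)]; omega))
            (by omega)
            (fun h => by
              cases hb : (v.set pos true).getD (r + 1) false with
              | false => rfl
              | true =>
                exfalso
                have := (hvchar'' (r + 1) (by omega)).mp hb
                rw [Nat.mod_eq_of_lt (by omega)] at this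
                omega)]
          rw [if_pos (by omega)]
        rw [hfind]
        have hstart : r + 1 = ((r + 1) + 0 * k) % n := by
          rw [Nat.zero_mul, Nat.add_zero, Nat.mod_eq_of_lt (by omega)]
        have hchain0 : pvChainFrom indices k g r (j + 1) = [] := by
          unfold pvChainFrom
          rw [← hn, ← hm, hjm]
          simp
        have hrange : List.range' (r + 1) (g - (r + 1)) =
            (r + 1) :: List.range' (r + 2) (g - (r + 2)) := by
          rw [show g - (r + 1) = (g - (r + 2)) + 1 by omega, List.range'_succ]
        have hrec := ih (r + 1) 0 (v.set pos true) (result ++ [indices.getD pos 0]) hrg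
            (by omega) (by rw [show (r + 1) * m + 0 = r * m + m by ring]; omega) hvlen'
            (by
              intro i hi
              rw [hvchar'' i hi]
              constructor
              · intro h; exact Or.inl (by omega)
              · rintro (h | ⟨_, t, ht, _⟩)
                · omega
                · omega)
            (by rw [hrlen', show (r + 1) * m + 0 = r * m + m by ring]; omega)
        rw [← hstart] at hrec
        refine hrec.trans ?_
        rw [htail]
        unfold pvTail
        rw [hchain0, hrange]
        simp [List.flatMap_cons, List.append_assoc]
      · -- all classes done: findIdx? is none, the loop returns
        have hall : ∀ i, i < (v.set pos true).length → (v.set pos true).getD i false = true := by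
          intro i hi
          rw [hvlen'] at hi
          exact (hvchar'' i hi).mpr (by have := Nat.mod_lt i hg0; omega)
        have hfind : (v.set pos true).findIdx? (fun b => !b) = none := by
          rw [findIdx?_eq_of_prefix (v.set pos true) (v.set pos true).length
            (fun i hi => hall i hi) (le_refl _) (fun h => absurd h (by omega))]
          rw [if_neg (by omega)]
        rw [hfind, htail]
        unfold pvTail
        have hchain0 : pvChainFrom indices k g r (j + 1) = [] := by
          unfold pvChainFrom
          rw [← hn, ← hm, hjm]
          simp
        have hrest : g - (r + 1) = 0 := by omega
        rw [hchain0, hrest]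
        simp

-- ===== VERDICT =====
theorem skip_reorder_spec : Claim_equal_skip_reorder := by
  intro indices skip _
  unfold Spec_skip_reorder skip_reorder skip_reorder_alt
  by_cases hz : indices.length = 0
  · rw [hz]
    simp [skip_reorder_loopA]
  · have hpos : 0 < indices.length := Nat.pos_of_ne_zero hz
    simp only [if_neg hz]
    rw [pyGcd_eq]
    have hg0 : 0 < Nat.gcd (PySem.Int.mod skip (indices.length : Int)).toNat indices.length :=
      Nat.gcd_pos_of_pos_right _ hpos
    have hgn : Nat.gcd (PySem.Int.mod skip (indices.length : Int)).toNat indices.length ∣ indices.length :=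
      Nat.gcd_dvd_right _ _
    have hm0 : 0 < indices.length / Nat.gcd (PySem.Int.mod skip (indices.length : Int)).toNat indices.length :=
      Nat.div_pos (Nat.le_of_dvd hpos hgn) hg0
    have hchar : ∀ i, i < indices.length →
        ((List.replicate indices.length false).getD i false = true ↔
          (i % Nat.gcd (PySem.Int.mod skip (indices.length : Int)).toNat indices.length < 0 ∨
           (i % Nat.gcd (PySem.Int.mod skip (indices.length : Int)).toNat indices.length = 0 ∧
            ∃ t, t < 0 ∧ (0 + t * (PySem.Int.mod skip (indices.length : Int)).toNat) % indices.length = i))) := by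
      intro i hi
      simp [List.getD, hi]
    have hmain := loopA_chains indices skip indices.length
      (PySem.Int.mod skip (indices.length : Int)).toNat
      (Nat.gcd (PySem.Int.mod skip (indices.length : Int)).toNat indices.length)
      (indices.length / Nat.gcd (PySem.Int.mod skip (indices.length : Int)).toNat indices.length)
      rfl hpos rfl rfl rfl indices.length 0 0 (List.replicate indices.length false) []
      hg0 hm0 (by omega) (by simp) hchar (by simp)
    have h00 : ((0 + 0 * (PySem.Int.mod skip (indices.length : Int)).toNat) % indices.length) = 0 := by
      simp
    rw [h00] at hmain
    rw [hmain, List.nil_append]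
    unfold pvTail pvChainFrom
    rw [show List.range (Nat.gcd (PySem.Int.mod skip (indices.length : Int)).toNat indices.length) =
        0 :: List.range' 1 (Nat.gcd (PySem.Int.mod skip (indices.length : Int)).toNat indices.length - 1) by
      rw [List.range_eq_range',
        show Nat.gcd (PySem.Int.mod skip (indices.length : Int)).toNat indices.length =
          (Nat.gcd (PySem.Int.mod skip (indices.length : Int)).toNat indices.length - 1) + 1 by omega,
        List.range'_succ]
      simp]
    rw [List.flatMap_cons]
    simp [List.range_eq_range']
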